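-- pv_equiv track=rewrite | github.com/theduardomaciel/cc-paa | extra/palindromo.py | reconstruct_palindrome
-- ===== SOURCE A (Python) =====
-- def reconstruct_palindrome(s, dp, i, j):
--     # Se só temos um caractere
--     if i == j:
--         return s[i]
--
--     # Se temos dois caracteres iguais
--     if i + 1 == j and s[i] == s[j]:
--         return s[i] + s[j]
--
--     # Se os caracteres nas extremidades são iguais
--     if s[i] == s[j]:
--         return s[i] + reconstruct_palindrome(s, dp, i + 1, j - 1) + s[j]
--
--     # Se o caractere da esquerda dá o melhor resultado
--     if dp[i][j - 1] > dp[i + 1][j]: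
--         return reconstruct_palindrome(s, dp, i, j - 1)
--     else:
--         return reconstruct_palindrome(s, dp, i + 1, j)
-- ===== SOURCE B (Python) =====
-- def reconstruct_palindrome(s, dp, i, j):
--     # The answer is a palindrome, so its right half mirrors its left half:
--     # compute only (left half, middle) and mirror once at the end.
--     def half_mid(i, j):
--         if i > j:
--             return [], ''
--         if i == j:
--             return [], s[i]
--         if s[i] == s[j]:
--             h, m = half_mid(i + 1, j - 1)
--             return [s[i]] + h, m
--         if dp[i][j - 1] > dp[i + 1][j]:
--             return half_mid(i, j - 1)
--         return half_mid(i + 1, j)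
--
--     h, m = half_mid(i, j)
--     return ''.join(h) + m + ''.join(reversed(h))
-- ===== Notes on version B (the rewrite author's own statement) =====
-- stated objective: alternative
-- what changed: B never builds the right side of the answer: since equal-end steps always append equal characters, it computes only the (left half, middle) pair by a recursion that returns a pair, then assembles half + middle + reversed(half) once, instead of A's recursion that concatenates full strings s[i] + inner + s[j] at every level.
-- outside the precondition, e.g. on reconstruct_palindrome('aab', [[0, 9], [0, 0, 0]], 0, 2): A returns 'aa', B returns 'aa'
import Mathlib
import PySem

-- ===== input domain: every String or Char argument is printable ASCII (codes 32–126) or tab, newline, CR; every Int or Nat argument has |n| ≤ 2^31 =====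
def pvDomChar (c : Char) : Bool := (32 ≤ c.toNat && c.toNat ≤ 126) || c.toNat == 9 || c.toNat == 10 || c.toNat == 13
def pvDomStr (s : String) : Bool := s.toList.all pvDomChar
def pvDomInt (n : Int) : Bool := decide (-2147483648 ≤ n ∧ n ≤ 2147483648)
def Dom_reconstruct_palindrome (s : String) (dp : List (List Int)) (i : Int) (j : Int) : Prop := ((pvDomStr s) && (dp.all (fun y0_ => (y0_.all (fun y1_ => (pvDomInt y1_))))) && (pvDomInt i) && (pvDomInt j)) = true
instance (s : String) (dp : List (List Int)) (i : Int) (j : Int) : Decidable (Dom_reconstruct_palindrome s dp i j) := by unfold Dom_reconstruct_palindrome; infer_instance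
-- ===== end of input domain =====

-- B computes only the (left half, middle) of the answer by a pair-returning recursion and
-- mirrors the half once at the end, instead of A's recursion concatenating full strings at
-- every level; the equivalence is about the return value (neither program mutates arguments).

-- s[i] (Python, possibly negative index); the default is never reached inside Pre_
def pvChar (cs : List Char) (i : Int) : Char := (PySem.List.pyGet? cs i).getD ' '
-- dp[i][j] (Python); the defaults are never reached inside Pre_
def pvDp (dp : List (List Int)) (i : Int) (j : Int) : Int :=
  (PySem.List.pyGet? ((PySem.List.pyGet? dp i).getD []) j).getD 0

-- ===== PORT A =====
-- fuel makes the recursion total; inside Pre_ each call strictly shrinks j-i, so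
-- (j-i).toNat + 1 units are always enough and fuel 0 is never reached.
def pvAgo (cs : List Char) (dp : List (List Int)) : Nat → Int → Int → List Char
  | 0, _, _ => []
  | f + 1, i, j =>
    if i = j then [pvChar cs i]
    else if i + 1 = j ∧ pvChar cs i = pvChar cs j then [pvChar cs i, pvChar cs j]
    else if pvChar cs i = pvChar cs j then
      pvChar cs i :: (pvAgo cs dp f (i + 1) (j - 1) ++ [pvChar cs j])
    else if pvDp dp i (j - 1) > pvDp dp (i + 1) j then pvAgo cs dp f i (j - 1)
    else pvAgo cs dp f (i + 1) j

def reconstruct_palindrome (s : String) (dp : List (List Int)) (i : Int) (j : Int) : String :=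
  String.ofList (pvAgo s.toList dp ((j - i).toNat + 1) i j)

-- ===== PORT B =====
-- Source B's half_mid: returns (left half, optional middle); recursion is well-founded on j - i
-- (every recursive call sits under the guards i ≤ j and i ≠ j, so j - i strictly shrinks).
def pvHalfMid (cs : List Char) (dp : List (List Int)) (i j : Int) : List Char × Option Char :=
  if i > j then ([], none)
  else if i = j then ([], some (pvChar cs i))
  else if pvChar cs i = pvChar cs j then
    let p := pvHalfMid cs dp (i + 1) (j - 1)
    (pvChar cs i :: p.1, p.2)
  else if pvDp dp i (j - 1) > pvDp dp (i + 1) j then pvHalfMid cs dp i (j - 1)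
  else pvHalfMid cs dp (i + 1) j
termination_by (j - i).toNat
decreasing_by all_goals omega

def reconstruct_palindrome_alt (s : String) (dp : List (List Int)) (i : Int) (j : Int) : String :=
  let p := pvHalfMid s.toList dp i j
  String.ofList (p.1 ++ p.2.toList ++ p.1.reverse)

-- ===== PRECONDITION & SPEC =====
-- s[i..j] is a palindrome (the recursion then never touches dp)
def pvPalOk (cs : List Char) (i : Int) (j : Int) : Bool :=
  (List.range ((j - i + 1).toNat)).all (fun k => pvChar cs (i + k) == pvChar cs (j - k))
-- dp[r][c] is a valid (possibly negative) Python index pair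
def pvCellOk (dp : List (List Int)) (r : Int) (c : Int) : Bool :=
  ((PySem.List.pyGet? dp r).bind (fun row => PySem.List.pyGet? row c)).isSome
-- every dp cell (r, c) with i ≤ r ≤ c ≤ j the recursion could touch exists
-- ((i, j) itself is never read)
def pvTriOk (dp : List (List Int)) (i : Int) (j : Int) : Bool :=
  (List.range ((j - i + 1).toNat)).all (fun a =>
    (List.range ((j - i + 1).toNat - a)).all (fun b =>
      (a == 0 && b == (j - i).toNat) || pvCellOk dp (i + a) (i + a + b)))

-- Pre_ is A's return domain: pointers indexing into the string (Python's negative indices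
-- included) and, when the recursion can touch dp (i < j), either a fully palindromic
-- segment (dp is never read) or every reachable triangle cell of dp present. Outside it
-- A raises IndexError, except on some ragged-dp inputs whose holes A's comparison path
-- happens to avoid, where A still returns; B behaves the same there (cite).
def Pre_reconstruct_palindrome (s : String) (dp : List (List Int)) (i : Int) (j : Int) : Prop :=
  -(s.toList.length : Int) ≤ i ∧ i ≤ j ∧ j < (s.toList.length : Int) ∧
    (i < j → pvPalOk s.toList i j = true ∨ pvTriOk dp i j = true)
instance (s : String) (dp : List (List Int)) (i : Int) (j : Int) :
    Decidable (Pre_reconstruct_palindrome s dp i j) := by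
  unfold Pre_reconstruct_palindrome; infer_instance

def pvWitness_reconstruct_palindrome : String × List (List Int) × Int × Int :=
  ("ab", [[1, 1], [0, 1]], 0, 1)

def Spec_reconstruct_palindrome (s : String) (dp : List (List Int)) (i : Int) (j : Int) (out : String) : Prop := out = reconstruct_palindrome_alt s dp i j
instance (s : String) (dp : List (List Int)) (i : Int) (j : Int) (out : String) : Decidable (Spec_reconstruct_palindrome s dp i j out) := by unfold Spec_reconstruct_palindrome; infer_instance

-- ===== CLAIM (what is proved, stated in full; the proofs are below) =====
def Claim_equal_reconstruct_palindrome : Prop := ∀ (s : String) (dp : List (List Int)) (i : Int) (j : Int), Dom_reconstruct_palindrome s dp i j → Pre_reconstruct_palindrome s dp i j → Spec_reconstruct_palindrome s dp i j (reconstruct_palindrome s dp i j)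

-- ===== LEMMAS AND PROOFS =====

-- A's fueled recursion equals B's half/middle pair mirrored
lemma pvAgo_eq_halfmid (cs : List Char) (dp : List (List Int)) :
    ∀ (fA : Nat) (i j : Int), i ≤ j → (j - i).toNat < fA →
      pvAgo cs dp fA i j =
        (pvHalfMid cs dp i j).1 ++ (pvHalfMid cs dp i j).2.toList
          ++ (pvHalfMid cs dp i j).1.reverse := by
  intro fA
  induction fA with
  | zero => intro i j hij hA; omega
  | succ f ih =>
    intro i j hij hA
    by_cases hieq : i = j
    · subst hieq
      rw [pvHalfMid]
      simp [pvAgo]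
    · have hlt : i < j := lt_of_le_of_ne hij hieq
      by_cases hc : pvChar cs i = pvChar cs j
      · by_cases hadj : i + 1 = j
        · -- two equal adjacent characters: B's inner call crosses and yields ([], none)
          rw [pvHalfMid, pvHalfMid]
          simp only [pvAgo, if_neg hieq, if_pos (And.intro hadj hc),
            if_neg (by omega : ¬ i > j), if_pos hc,
            if_pos (by omega : i + 1 > j - 1)]
          simp [hc]
        · -- equal outer characters: B prepends the character to the inner half
          have hin : i + 1 ≤ j - 1 := by omega
          rw [pvHalfMid]
          simp only [pvAgo, if_neg hieq, if_neg (fun h : i + 1 = j ∧ _ => hadj h.1),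
            if_pos hc, if_neg (by omega : ¬ i > j)]
          rw [ih (i + 1) (j - 1) hin (by omega)]
          simp [hc]
      · -- unequal outer characters: both sides move the same pointer
        rw [pvHalfMid]
        simp only [pvAgo, if_neg hieq, if_neg (fun h : i + 1 = j ∧ _ => hc h.2),
          if_neg hc, if_neg (by omega : ¬ i > j)]
        by_cases hdp : pvDp dp i (j - 1) > pvDp dp (i + 1) j
        · rw [if_pos hdp, if_pos hdp, ih i (j - 1) (by omega) (by omega)]
        · rw [if_neg hdp, if_neg hdp, ih (i + 1) j (by omega) (by omega)]

-- ===== VERDICT (by name: the statement is the Claim_ definition above) =====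
theorem reconstruct_palindrome_spec : Claim_equal_reconstruct_palindrome := by
  intro s dp i j _hDom hPre
  unfold Spec_reconstruct_palindrome reconstruct_palindrome reconstruct_palindrome_alt
  rw [pvAgo_eq_halfmid s.toList dp ((j - i).toNat + 1) i j hPre.2.1 (by omega)]
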